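-- pv_equiv track=rewrite | github.com/1o68o7/silo | database/service.py | _extract_zone_texte
-- ===== SOURCE A (Python) =====
-- from typing import Optional
--
-- def _extract_zone_texte(content_text: Optional[str], max_chars: int = 300) -> str:
--     """
--     Extrait la zone de texte (paragraphe) la plus pertinente pour insérer un lien.
--     Utilise le premier paragraphe substantiel du contenu.
--     """
--     if not content_text or not content_text.strip():
--         return ""
--     # Découper par paragraphes (double saut de ligne ou \n\n)
--     paragraphs = [p.strip() for p in content_text.split("\n\n") if len(p.strip()) > 50]
--     if not paragraphs:
--         # Fallback: premier bloc de texte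
--         text = content_text.strip()[:max_chars]
--         return text + ("..." if len(content_text) > max_chars else "")
--     # Retourner le premier paragraphe significatif (hors intro courte)
--     for p in paragraphs:
--         if len(p) >= 80:
--             return (p[:max_chars] + "...") if len(p) > max_chars else p
--     return paragraphs[0][:max_chars] + ("..." if len(paragraphs[0]) > max_chars else "")
-- ===== SOURCE B (Python) =====
-- from typing import Optional
--
-- def _extract_zone_texte(content_text: Optional[str], max_chars: int = 300) -> str:
--     if not content_text or not content_text.strip():
--         return ""
--     first_substantial = None
--     first_significant = None
--     for piece in content_text.split("\n\n"):
--         p = piece.strip()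
--         if len(p) > 50 and first_substantial is None:
--             first_substantial = p
--         if len(p) >= 80:
--             first_significant = p
--             break
--     chosen = first_significant if first_significant is not None else first_substantial
--     if chosen is not None:
--         return chosen[:max_chars] + "..." if len(chosen) > max_chars else chosen
--     text = content_text.strip()[:max_chars]
--     return text + ("..." if len(content_text) > max_chars else "")
-- ===== Notes on version B (the rewrite author's own statement) =====
-- stated objective: alternative
-- what changed: Replaces A's build-a-filtered-paragraph-list-then-rescan-it decomposition with a single early-exit pass over the split pieces that tracks the first substantial (>50) and first significant (>=80) stripped paragraph, then applies one shared truncation step.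
import Mathlib
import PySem

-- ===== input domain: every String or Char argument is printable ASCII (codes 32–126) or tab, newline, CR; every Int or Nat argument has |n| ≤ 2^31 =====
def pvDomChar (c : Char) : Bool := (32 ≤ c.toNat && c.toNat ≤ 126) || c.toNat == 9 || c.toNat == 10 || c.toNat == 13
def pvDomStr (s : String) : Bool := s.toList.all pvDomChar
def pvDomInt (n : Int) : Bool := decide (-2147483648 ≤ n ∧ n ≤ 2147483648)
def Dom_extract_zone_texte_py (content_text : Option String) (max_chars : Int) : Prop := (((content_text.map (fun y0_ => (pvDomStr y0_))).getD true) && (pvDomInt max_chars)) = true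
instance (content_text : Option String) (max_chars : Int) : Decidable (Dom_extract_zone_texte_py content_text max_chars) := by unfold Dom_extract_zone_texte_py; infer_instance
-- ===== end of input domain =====

-- B replaces A's filter-a-list-then-rescan-it decomposition by one early-exit pass that keeps the
-- first substantial (>50) and first significant (>=80) stripped paragraph; same return value (alternative).

-- ===== PORT A =====
-- A's `for p in paragraphs: if len(p) >= 80: return …` (early-return loop)
def pvALoop (max_chars : Int) : List String → Option String
  | [] => none
  | p :: t =>
    if 80 ≤ PySem.Str.len p then
      some (if PySem.Str.len p > max_chars then PySem.Str.slice p none (some max_chars) ++ "..." else p)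
    else pvALoop max_chars t

def extract_zone_texte_py (content_text : Option String) (max_chars : Int) : String :=
  match content_text with
  | none => ""
  | some s =>
    if s = "" ∨ PySem.Str.strip s = "" then ""
    else
      let paragraphs := (((PySem.Str.split? s "\n\n").getD []).map PySem.Str.strip).filter
        (fun p => 50 < PySem.Str.len p)
      if paragraphs = [] then
        PySem.Str.slice (PySem.Str.strip s) none (some max_chars) ++
          (if PySem.Str.len s > max_chars then "..." else "")
      else
        match pvALoop max_chars paragraphs with
        | some r => r
        | none =>
          PySem.Str.slice (paragraphs.headD "") none (some max_chars) ++
            (if PySem.Str.len (paragraphs.headD "") > max_chars then "..." else "")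

-- ===== PORT B =====
def pvTrunc (max_chars : Int) (p : String) : String :=
  if PySem.Str.len p > max_chars then PySem.Str.slice p none (some max_chars) ++ "..." else p

-- B's single loop: (first_substantial, first_significant); breaks on the first significant piece
def pvScan : List String → Option String → Option String × Option String
  | [], first_substantial => (first_substantial, none)
  | piece :: t, first_substantial =>
    let p := PySem.Str.strip piece
    let fs := if 50 < PySem.Str.len p ∧ first_substantial = none then some p else first_substantial
    if 80 ≤ PySem.Str.len p then (fs, some p) else pvScan t fs

def extract_zone_texte_py_alt (content_text : Option String) (max_chars : Int) : String :=
  match content_text with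
  | none => ""
  | some s =>
    if s = "" ∨ PySem.Str.strip s = "" then ""
    else
      let r := pvScan ((PySem.Str.split? s "\n\n").getD []) none
      match (match r.2 with | some p => some p | none => r.1) with
      | some chosen => pvTrunc max_chars chosen
      | none =>
        PySem.Str.slice (PySem.Str.strip s) none (some max_chars) ++
          (if PySem.Str.len s > max_chars then "..." else "")

-- ===== PRECONDITION & SPEC =====
def Spec_extract_zone_texte_py (content_text : Option String) (max_chars : Int) (out : String) : Prop := out = extract_zone_texte_py_alt content_text max_chars
instance (content_text : Option String) (max_chars : Int) (out : String) : Decidable (Spec_extract_zone_texte_py content_text max_chars out) := by unfold Spec_extract_zone_texte_py; infer_instance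

-- ===== CLAIM (what is proved, stated in full; the proofs are below) =====
def Claim_equal_extract_zone_texte_py : Prop := ∀ (content_text : Option String) (max_chars : Int), Dom_extract_zone_texte_py content_text max_chars → Spec_extract_zone_texte_py content_text max_chars (extract_zone_texte_py content_text max_chars)

-- ===== LEMMAS AND PROOFS =====

-- A's `p[:mc] + ("..." if len(p) > mc else "")` equals B's pvTrunc
theorem pvTrunc_eq (mc : Int) (p : String) :
    PySem.Str.slice p none (some mc) ++ (if PySem.Str.len p > mc then "..." else "") =
      pvTrunc mc p := by
  unfold pvTrunc
  by_cases h : PySem.Str.len p > mc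
  · rw [if_pos h, if_pos h]
  · rw [if_neg h, if_neg h]
    have hlen : (p.toList.length : Int) ≤ mc := by
      have := PySem.Str.len_eq p; omega
    have hs : PySem.Str.slice p none (some mc) = p := by
      apply String.toList_inj.mp
      rw [PySem.Str.toList_slice, PySem.Chars.slice_eq_listSlice,
        PySem.List.slice_to p.toList (by omega : (0:Int) ≤ mc)]
      exact List.take_of_length_le (by omega)
    rw [hs, String.append_empty]

-- the single-pass scan, dispatched as B does, equals A's filter/rescan decomposition
set_option maxHeartbeats 1000000 in
theorem pvScan_master (mc : Int) (FB : String) (xs : List String) :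
    ∀ acc : Option String,
    (match pvScan xs acc with
     | (_, some p) => pvTrunc mc p
     | (some q, none) => pvTrunc mc q
     | (none, none) => FB) =
    (match acc with
     | some q =>
       match pvALoop mc ((xs.map PySem.Str.strip).filter (fun p => 50 < PySem.Str.len p)) with
       | some r => r
       | none => pvTrunc mc q
     | none =>
       if ((xs.map PySem.Str.strip).filter (fun p => 50 < PySem.Str.len p)) = [] then FB
       else
         match pvALoop mc ((xs.map PySem.Str.strip).filter (fun p => 50 < PySem.Str.len p)) with
         | some r => r
         | none =>
           PySem.Str.slice (((xs.map PySem.Str.strip).filter (fun p => 50 < PySem.Str.len p)).headD "")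
               none (some mc) ++
             (if PySem.Str.len (((xs.map PySem.Str.strip).filter (fun p => 50 < PySem.Str.len p)).headD "") > mc
              then "..." else "")) := by
  induction xs with
  | nil =>
    intro acc
    cases acc <;> simp [pvScan, pvALoop]
  | cons piece t ih =>
    intro acc
    conv_lhs => rw [pvScan]
    simp only [List.map_cons, List.filter_cons]
    by_cases h80 : 80 ≤ PySem.Str.len (PySem.Str.strip piece)
    · have h50 : (decide (50 < PySem.Str.len (PySem.Str.strip piece))) = true :=
        decide_eq_true (lt_of_lt_of_le (by norm_num) h80)
      rw [if_pos h50, if_pos h80]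
      have hloop : pvALoop mc (PySem.Str.strip piece ::
          (t.map PySem.Str.strip).filter (fun p => 50 < PySem.Str.len p)) =
          some (if PySem.Str.len (PySem.Str.strip piece) > mc then
            PySem.Str.slice (PySem.Str.strip piece) none (some mc) ++ "..."
          else PySem.Str.strip piece) := by
        rw [show pvALoop mc (PySem.Str.strip piece ::
            (t.map PySem.Str.strip).filter (fun p => 50 < PySem.Str.len p)) =
          if 80 ≤ PySem.Str.len (PySem.Str.strip piece) then
            some (if PySem.Str.len (PySem.Str.strip piece) > mc then
              PySem.Str.slice (PySem.Str.strip piece) none (some mc) ++ "..."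
            else PySem.Str.strip piece)
          else pvALoop mc ((t.map PySem.Str.strip).filter (fun p => 50 < PySem.Str.len p)) from rfl,
          if_pos h80]
      cases acc with
      | none =>
        rw [if_pos ⟨by omega, rfl⟩, if_neg (List.cons_ne_nil _ _), hloop]
        rfl
      | some q =>
        rw [if_neg (by simp), hloop]
        rfl
    · have hloop : pvALoop mc (PySem.Str.strip piece ::
          (t.map PySem.Str.strip).filter (fun p => 50 < PySem.Str.len p)) =
          pvALoop mc ((t.map PySem.Str.strip).filter (fun p => 50 < PySem.Str.len p)) := by
        rw [show pvALoop mc (PySem.Str.strip piece ::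
            (t.map PySem.Str.strip).filter (fun p => 50 < PySem.Str.len p)) =
          if 80 ≤ PySem.Str.len (PySem.Str.strip piece) then
            some (if PySem.Str.len (PySem.Str.strip piece) > mc then
              PySem.Str.slice (PySem.Str.strip piece) none (some mc) ++ "..."
            else PySem.Str.strip piece)
          else pvALoop mc ((t.map PySem.Str.strip).filter (fun p => 50 < PySem.Str.len p)) from rfl,
          if_neg h80]
      by_cases h50 : 50 < PySem.Str.len (PySem.Str.strip piece)
      · have h50' : (decide (50 < PySem.Str.len (PySem.Str.strip piece))) = true := by
          simpa using h50
        rw [if_neg h80, if_pos h50']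
        cases acc with
        | none =>
          rw [if_pos ⟨h50, rfl⟩, ih (some (PySem.Str.strip piece)),
            if_neg (List.cons_ne_nil _ _), hloop]
          simp only [List.headD_cons]
          cases pvALoop mc ((t.map PySem.Str.strip).filter (fun p => 50 < PySem.Str.len p)) with
          | some r => rfl
          | none => exact (pvTrunc_eq mc _).symm
        | some q =>
          rw [if_neg (by simp), ih (some q), hloop]
      · have h50' : (decide (50 < PySem.Str.len (PySem.Str.strip piece))) = false :=
          decide_eq_false h50
        rw [if_neg h80, h50', if_neg (by decide : ¬(false = true))]
        have hno : ¬(50 < PySem.Str.len (PySem.Str.strip piece) ∧ acc = none) := by tauto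
        rw [if_neg hno, ih acc]

-- ===== VERDICT (by name: the statement is the Claim_ definition above) =====
theorem extract_zone_texte_py_spec : Claim_equal_extract_zone_texte_py := by
  intro content_text max_chars _
  unfold Spec_extract_zone_texte_py extract_zone_texte_py extract_zone_texte_py_alt
  cases content_text with
  | none => rfl
  | some s =>
    by_cases hg : s = "" ∨ PySem.Str.strip s = ""
    · simp [hg]
    · simp only [hg, if_false]
      refine Eq.trans (Eq.symm (pvScan_master max_chars
        (PySem.Str.slice (PySem.Str.strip s) none (some max_chars) ++
          (if PySem.Str.len s > max_chars then "..." else ""))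
        ((PySem.Str.split? s "\n\n").getD []) none)) ?_
      cases hsc : pvScan ((PySem.Str.split? s "\n\n").getD []) none with
      | mk fs sig => cases sig <;> cases fs <;> rfl
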